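-- pv_equiv track=rewrite | github.com/workshopcompany/MOLDIQ | core/flow_csv_generator.py | _find_artifact
-- ===== SOURCE A (Python) =====
-- def _find_artifact(signal_id: str, artifacts: list[dict]) -> dict | None:
--     """
--     여러 매칭 전략으로 아티팩트를 탐색. 최신 것 우선.
--
--     전략 1: 아티팩트 name이 signal_id를 포함
--     전략 2: signal_id가 아티팩트 name을 포함 (역방향)
--     전략 3: "simulation" 이름을 가진 것 중 가장 최신
--     """
--     sig = signal_id.lower()
--
--     # 전략 1
--     for a in artifacts:
--         if sig in a.get("name", "").lower():
--             return a
--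
--     # 전략 2
--     for a in artifacts:
--         if a.get("name", "").lower() in sig:
--             return a
--
--     # 전략 3: 입력값이 없거나 "latest"이면 simulation 이름 최신것
--     if not sig or sig == "latest":
--         for a in artifacts:
--             if "simulation" in a.get("name", "").lower():
--                 return a
--
--     return None
-- ===== SOURCE B (Python) =====
-- def _find_artifact(signal_id: str, artifacts: list[dict]) -> dict | None:
--     """One forward pass recording the first candidate for each of the three
--     matching strategies, then pick by priority (strategy 3 gated on sig)."""
--     sig = signal_id.lower()
--     cand1 = cand2 = cand3 = None
--     for a in artifacts:
--         name = a.get("name", "").lower()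
--         if cand1 is None and sig in name:
--             cand1 = a
--         if cand2 is None and name in sig:
--             cand2 = a
--         if cand3 is None and "simulation" in name:
--             cand3 = a
--     if cand1 is not None:
--         return cand1
--     if cand2 is not None:
--         return cand2
--     if not sig or sig == "latest":
--         return cand3
--     return None
-- ===== Notes on version B (the rewrite author's own statement) =====
-- stated objective: alternative
-- what changed: A runs up to three sequential scans over artifacts (one per strategy); B makes a single forward pass recording the first candidate for each of the three strategies and then selects by priority, gating strategy 3 on the sig check.
import Mathlib
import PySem

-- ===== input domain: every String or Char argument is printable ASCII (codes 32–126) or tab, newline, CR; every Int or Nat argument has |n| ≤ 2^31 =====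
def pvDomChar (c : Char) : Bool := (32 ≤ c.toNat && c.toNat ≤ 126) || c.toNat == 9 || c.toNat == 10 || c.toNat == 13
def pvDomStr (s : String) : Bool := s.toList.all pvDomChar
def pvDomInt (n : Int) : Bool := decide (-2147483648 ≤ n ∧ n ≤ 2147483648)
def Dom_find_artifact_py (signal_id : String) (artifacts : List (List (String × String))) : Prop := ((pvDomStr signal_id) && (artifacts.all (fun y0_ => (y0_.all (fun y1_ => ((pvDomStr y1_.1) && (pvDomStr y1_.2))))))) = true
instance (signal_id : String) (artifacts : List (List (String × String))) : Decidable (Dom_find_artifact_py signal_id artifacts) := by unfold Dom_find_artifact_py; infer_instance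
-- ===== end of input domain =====

-- B replaces A's three sequential scans by ONE forward pass that records the first
-- candidate for each strategy, then selects by priority (objective: alternative decomposition).


-- ===== PORT A =====
-- a.get("name", "").lower() of an artifact given as an association list
def pvName (a : List (String × String)) : String :=
  PySem.Str.lower (PySem.Dict.getD (PySem.Dict.mk a) "name" "")

def find_artifact_py (signal_id : String) (artifacts : List (List (String × String))) : Option (List (String × String)) :=
  let sig := PySem.Str.lower signal_id
  -- strategy 1: first artifact whose lowered name contains sig
  match artifacts.find? (fun a => PySem.Str.isIn sig (pvName a)) with
  | some a => some a
  | none =>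
    -- strategy 2: first artifact whose lowered name is contained in sig
    match artifacts.find? (fun a => PySem.Str.isIn (pvName a) sig) with
    | some a => some a
    | none =>
      -- strategy 3, only when sig is empty or "latest"
      if sig = "" ∨ sig = "latest" then
        artifacts.find? (fun a => PySem.Str.isIn "simulation" (pvName a))
      else none

-- ===== PORT B =====
-- one loop step of Source B: record each candidate only while it is still None
def pvStep (sig : String) (c : Option (List (String × String)) × Option (List (String × String)) × Option (List (String × String)))
    (a : List (String × String)) :
    Option (List (String × String)) × Option (List (String × String)) × Option (List (String × String)) :=
  let name := pvName a
  ((if c.1.isNone && PySem.Str.isIn sig name then some a else c.1),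
   (if c.2.1.isNone && PySem.Str.isIn name sig then some a else c.2.1),
   (if c.2.2.isNone && PySem.Str.isIn "simulation" name then some a else c.2.2))

def find_artifact_py_alt (signal_id : String) (artifacts : List (List (String × String))) : Option (List (String × String)) :=
  let sig := PySem.Str.lower signal_id
  let c := artifacts.foldl (pvStep sig) (none, none, none)
  if c.1.isSome then c.1
  else if c.2.1.isSome then c.2.1
  else if sig = "" ∨ sig = "latest" then c.2.2
  else none

-- ===== PRECONDITION & SPEC =====
def Spec_find_artifact_py (signal_id : String) (artifacts : List (List (String × String))) (out : Option (List (String × String))) : Prop := out = find_artifact_py_alt signal_id artifacts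
instance (signal_id : String) (artifacts : List (List (String × String))) (out : Option (List (String × String))) : Decidable (Spec_find_artifact_py signal_id artifacts out) := by unfold Spec_find_artifact_py; infer_instance

-- ===== CLAIM (what is proved, stated in full; the proofs are below) =====
def Claim_equal_find_artifact_py : Prop := ∀ (signal_id : String) (artifacts : List (List (String × String))), Dom_find_artifact_py signal_id artifacts → Spec_find_artifact_py signal_id artifacts (find_artifact_py signal_id artifacts)

-- ===== LEMMAS AND PROOFS =====

-- the one-pass fold computes, componentwise, "initial candidate, else first match"
theorem foldl_pvStep (sig : String) (l : List (List (String × String)))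
    (c : Option (List (String × String)) × Option (List (String × String)) × Option (List (String × String))) :
    l.foldl (pvStep sig) c =
      (c.1.or (l.find? (fun a => PySem.Str.isIn sig (pvName a))),
       c.2.1.or (l.find? (fun a => PySem.Str.isIn (pvName a) sig)),
       c.2.2.or (l.find? (fun a => PySem.Str.isIn "simulation" (pvName a)))) := by
  induction l generalizing c with
  | nil => simp
  | cons a t ih =>
    obtain ⟨c1, c2, c3⟩ := c
    simp only [List.foldl_cons, ih, pvStep, List.find?_cons]
    cases c1 <;> cases c2 <;> cases c3 <;>
      simp <;> split_ifs <;> simp_all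

theorem find_artifact_py_eq_alt (signal_id : String) (artifacts : List (List (String × String))) :
    find_artifact_py signal_id artifacts = find_artifact_py_alt signal_id artifacts := by
  simp only [find_artifact_py, find_artifact_py_alt, foldl_pvStep]
  cases h1 : artifacts.find? (fun a => PySem.Str.isIn (PySem.Str.lower signal_id) (pvName a)) <;>
    cases h2 : artifacts.find? (fun a => PySem.Str.isIn (pvName a) (PySem.Str.lower signal_id)) <;>
      simp

-- ===== VERDICT (by name: the statement is the Claim_ definition above) =====
theorem find_artifact_py_spec : Claim_equal_find_artifact_py := by
  intro signal_id artifacts _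
  exact find_artifact_py_eq_alt signal_id artifacts
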